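-- pv_equiv track=rewrite | github.com/namastegit/current | python/ironman.py | contains_repeating_words
-- ===== SOURCE A (Python) =====
-- def contains_repeating_words(text):
--     words = text.lower().split()
--     word_count = {}
--
--     for word in words:
--         if len(word) > 3:
--             word_count[word] = word_count.get(word, 0) + 1
--
--     for count in word_count.values():
--         if count > 3:
--             return True
--
--     return False
-- ===== SOURCE B (Python) =====
-- def contains_repeating_words(text):
--     longs = sorted(w for w in text.lower().split() if len(w) > 3)
--     prev = None
--     run = 0
--     for w in longs:
--         if w == prev:
--             run += 1
--         else:
--             prev = w
--             run = 1
--         if run > 3: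
--             return True
--     return False
-- ===== Notes on version B (the rewrite author's own statement) =====
-- stated objective: alternative
-- what changed: Replaced the frequency dictionary + values scan with sorting the length>3 words and a single run-length scan over the sorted list with early exit.
import Mathlib
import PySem

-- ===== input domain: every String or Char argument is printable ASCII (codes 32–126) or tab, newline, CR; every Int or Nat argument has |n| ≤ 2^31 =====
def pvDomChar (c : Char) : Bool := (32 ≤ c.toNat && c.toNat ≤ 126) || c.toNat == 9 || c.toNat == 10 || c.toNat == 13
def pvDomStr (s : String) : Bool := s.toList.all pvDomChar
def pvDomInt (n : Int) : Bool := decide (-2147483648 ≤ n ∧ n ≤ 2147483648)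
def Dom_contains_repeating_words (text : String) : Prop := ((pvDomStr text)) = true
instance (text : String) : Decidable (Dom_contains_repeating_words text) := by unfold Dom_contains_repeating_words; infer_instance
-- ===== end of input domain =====

-- B replaces A's frequency dictionary + values scan by sorting the length>3 words and
-- counting runs of equal adjacent words in one pass (alternative algorithm, same cost class).

-- ===== PORT A =====
def contains_repeating_words (text : String) : Bool :=
  let words := PySem.Str.split₀ (PySem.Str.lower text)
  let word_count := words.foldl
    (fun d w => if PySem.Str.len w > 3 then d.insert w (d.getD w 0 + 1) else d)
    (PySem.Dict.empty : PySem.Dict String Int)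
  word_count.values.any (fun c => c > 3)

-- ===== PORT B =====
-- the for-loop of Source B with its early `return True`, as structural recursion over the sorted list
def pvRunScan : List String → Option String → Int → Bool
  | [], _, _ => false
  | w :: rest, prev, run =>
    let prev' := if prev == some w then prev else some w
    let run'  := if prev == some w then run + 1 else 1
    if run' > 3 then true else pvRunScan rest prev' run'

def contains_repeating_words_alt (text : String) : Bool :=
  let longs := PySem.List.sorted
    ((PySem.Str.split₀ (PySem.Str.lower text)).filter (fun w => PySem.Str.len w > 3))
    (fun x => x) false
  pvRunScan longs none 0

-- ===== PRECONDITION & SPEC =====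
def Spec_contains_repeating_words (text : String) (out : Bool) : Prop := out = contains_repeating_words_alt text
instance (text : String) (out : Bool) : Decidable (Spec_contains_repeating_words text out) := by unfold Spec_contains_repeating_words; infer_instance

-- ===== CLAIM (what is proved, stated in full; the proofs are below) =====
def Claim_equal_contains_repeating_words : Prop := ∀ (text : String), Dom_contains_repeating_words text → Spec_contains_repeating_words text (contains_repeating_words text)

-- ===== LEMMAS AND PROOFS =====

-- folding with a guard equals folding the filtered list
theorem pv_foldl_guard_filter {α β : Type} (p : α → Prop) [DecidablePred p] (f : β → α → β) :
    ∀ (l : List α) (d : β),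
      l.foldl (fun d w => if p w then f d w else d) d
        = (l.filter (fun w => decide (p w))).foldl f d := by
  intro l
  induction l with
  | nil => intro d; rfl
  | cons w rest ih =>
    intro d
    by_cases h : p w
    · simp [h, ih]
    · simp [h, ih]

-- A returns true iff some length>3 word occurs more than 3 times (in the filtered list)
theorem pv_A_iff (text : String) :
    contains_repeating_words text = true ↔
      ∃ w ∈ (PySem.Str.split₀ (PySem.Str.lower text)).filter (fun w => PySem.Str.len w > 3),
        3 < ((PySem.Str.split₀ (PySem.Str.lower text)).filter (fun w => PySem.Str.len w > 3)).count w := by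
  set ws := (PySem.Str.split₀ (PySem.Str.lower text)).filter (fun w => PySem.Str.len w > 3) with hws
  show ((PySem.Str.split₀ (PySem.Str.lower text)).foldl
      (fun d w => if PySem.Str.len w > 3 then d.insert w (d.getD w 0 + 1) else d)
      (PySem.Dict.empty : PySem.Dict String Int)).values.any (fun c => c > 3) = true ↔ _
  rw [pv_foldl_guard_filter, ← hws, PySem.Dict.foldl_insert_getD_add_one_eq_counter,
      PySem.Dict.values_eq_map_keys _ (PySem.Dict.nodup_keys_counter ws) 0,
      PySem.Dict.keys_counter]
  simp only [List.any_map, List.any_eq_true, PySem.Set.mem_ofList, PySem.Dict.getD_counter,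
    Function.comp, decide_eq_true_eq]
  constructor
  · rintro ⟨w, hw, hc⟩; exact ⟨w, hw, by exact_mod_cast hc⟩
  · rintro ⟨w, hw, hc⟩; exact ⟨w, hw, by exact_mod_cast hc⟩

-- run-scan invariant on a sorted list: prev = some p was seen in a run of length r (1 ≤ r ≤ 3)
theorem pv_runScan_some (l : List String) :
    ∀ (p : String) (r : Int), l.Pairwise (· ≤ ·) → (∀ x ∈ l, p ≤ x) → 1 ≤ r → r ≤ 3 →
      (pvRunScan l (some p) r = true ↔
        3 < r + (l.count p : Int) ∨ ∃ w ∈ l, w ≠ p ∧ 3 < l.count w) := by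
  induction l with
  | nil =>
    intro p r _ _ _ h3
    simp [pvRunScan]
    omega
  | cons w rest ih =>
    intro p r hp hle h1 h3
    have hpw : p ≤ w := hle w (by simp)
    have hrest : rest.Pairwise (· ≤ ·) := hp.of_cons
    have hwle : ∀ x ∈ rest, w ≤ x := fun x hx => (List.pairwise_cons.mp hp).1 x hx
    by_cases he : p = w
    · subst he
      -- same word: run grows
      by_cases hr : r + 1 > 3
      · -- early return True; and indeed the count witnesses it
        have : pvRunScan (p :: rest) (some p) r = true := by
          simp [pvRunScan, hr]
        rw [this]
        simp only [true_iff]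
        left
        have : (1 : Int) ≤ ((p :: rest).count p : Int) := by
          have := List.count_pos_iff.mpr (List.mem_cons_self (a := p) (l := rest))
          exact_mod_cast this
        omega
      · have hstep : pvRunScan (p :: rest) (some p) r = pvRunScan rest (some p) (r + 1) := by
          simp [pvRunScan, hr]
        rw [hstep, ih p (r + 1) hrest (fun x hx => le_trans hpw (hwle x hx)) (by omega) (by omega)]
        have hcount : (p :: rest).count p = rest.count p + 1 := by simp
        constructor
        · rintro (h | ⟨v, hv, hvp, hc⟩)
          · left; rw [hcount]; push_cast; omega
          · right
            exact ⟨v, List.mem_cons_of_mem _ hv, hvp,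
              by simpa [List.count_cons, Ne.symm hvp]⟩
        · rintro (h | ⟨v, hv, hvp, hc⟩)
          · left; rw [hcount] at h; push_cast at h ⊢; omega
          · rcases List.mem_cons.mp hv with h' | h'
            · exact absurd h' hvp
            · right
              exact ⟨v, h', hvp, by simpa [List.count_cons, Ne.symm hvp] using hc⟩
    · -- new word w: run resets to 1
      have hlt : p < w := lt_of_le_of_ne hpw he
      have hbeq : (some p == some w) = false := by
        simp [he]
      have hstep : pvRunScan (w :: rest) (some p) r = pvRunScan rest (some w) 1 := by
        simp [pvRunScan, hbeq]
      have hpnot : p ∉ w :: rest := by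
        intro hmem
        rcases List.mem_cons.mp hmem with h' | h'
        · exact he h'
        · exact absurd (hwle p h') (not_le.mpr hlt)
      have hcp : (w :: rest).count p = 0 := List.count_eq_zero.mpr hpnot
      rw [hstep, ih w 1 hrest hwle (by omega) (by omega)]
      have hcw : (w :: rest).count w = rest.count w + 1 := by simp
      constructor
      · rintro (h | ⟨v, hv, hvw, hc⟩)
        · right
          refine ⟨w, by simp, Ne.symm he, ?_⟩
          rw [hcw]
          omega
        · right
          have hvp : v ≠ p := by
            intro hvp'; subst hvp'
            exact hpnot (List.mem_cons_of_mem _ hv)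
          exact ⟨v, List.mem_cons_of_mem _ hv, hvp,
            by simpa [List.count_cons, Ne.symm hvw]⟩
      · rintro (h | ⟨v, hv, hvp, hc⟩)
        · rw [hcp] at h
          omega
        · rcases List.mem_cons.mp hv with h' | h'
          · subst h'
            left
            rw [hcw] at hc
            omega
          · by_cases hvw : v = w
            · subst hvw
              left
              rw [hcw] at hc
              omega
            · right
              exact ⟨v, h', hvw, by simpa [List.count_cons, Ne.symm hvw] using hc⟩

-- the full scan on a sorted list detects a word occurring more than 3 times
theorem pv_runScan_none (l : List String) (hp : l.Pairwise (· ≤ ·)) :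
    pvRunScan l none 0 = true ↔ ∃ w ∈ l, 3 < l.count w := by
  cases l with
  | nil => simp [pvRunScan]
  | cons w rest =>
    have hrest : rest.Pairwise (· ≤ ·) := hp.of_cons
    have hwle : ∀ x ∈ rest, w ≤ x := fun x hx => (List.pairwise_cons.mp hp).1 x hx
    have hstep : pvRunScan (w :: rest) none 0 = pvRunScan rest (some w) 1 := by
      simp [pvRunScan]
    rw [hstep, pv_runScan_some rest w 1 hrest hwle (by omega) (by omega)]
    have hcw : (w :: rest).count w = rest.count w + 1 := by simp
    constructor
    · rintro (h | ⟨v, hv, hvw, hc⟩)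
      · refine ⟨w, by simp, ?_⟩
        rw [hcw]; omega
      · exact ⟨v, List.mem_cons_of_mem _ hv,
          by simpa [List.count_cons, Ne.symm hvw]⟩
    · rintro ⟨v, hv, hc⟩
      rcases List.mem_cons.mp hv with h' | h'
      · subst h'
        left
        rw [hcw] at hc; omega
      · by_cases hvw : v = w
        · subst hvw
          left
          rw [hcw] at hc; omega
        · right
          exact ⟨v, h', hvw, by simpa [List.count_cons, Ne.symm hvw] using hc⟩

-- B returns true iff some length>3 word occurs more than 3 times
theorem pv_B_iff (text : String) :
    contains_repeating_words_alt text = true ↔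
      ∃ w ∈ (PySem.Str.split₀ (PySem.Str.lower text)).filter (fun w => PySem.Str.len w > 3),
        3 < ((PySem.Str.split₀ (PySem.Str.lower text)).filter (fun w => PySem.Str.len w > 3)).count w := by
  set ws := (PySem.Str.split₀ (PySem.Str.lower text)).filter (fun w => PySem.Str.len w > 3) with hws
  unfold contains_repeating_words_alt
  rw [← hws]
  set longs := PySem.List.sorted ws (fun x => x) false with hl
  have hperm : longs.Perm ws := PySem.List.sorted_perm ws (fun x => x) false
  have hpw : longs.Pairwise (· ≤ ·) := by
    have := PySem.List.sorted_pairwise (xs := ws) (key := fun x => x)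
    simpa using this
  rw [pv_runScan_none longs hpw]
  constructor
  · rintro ⟨w, hw, hc⟩
    exact ⟨w, hperm.mem_iff.mp hw, by rwa [hperm.count_eq] at hc⟩
  · rintro ⟨w, hw, hc⟩
    exact ⟨w, hperm.mem_iff.mpr hw, by rwa [hperm.count_eq]⟩

-- ===== VERDICT (by name: the statement is the Claim_ definition above) =====
theorem contains_repeating_words_spec : Claim_equal_contains_repeating_words := by
  intro text _
  unfold Spec_contains_repeating_words
  have := (pv_A_iff text).trans (pv_B_iff text).symm
  cases hA : contains_repeating_words text <;> cases hB : contains_repeating_words_alt text <;>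
    simp_all
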